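-- pv_equiv track=rewrite | github.com/baptistejeh07-art/finsight-ia | core/market/timeseries.py | _detect_benchmark
-- ===== SOURCE A (Python) =====
-- def _detect_benchmark(ticker: str, sector: str = "") -> tuple[str, str]:
--     """Retourne (index_ticker, index_name) selon le pays du ticker.
--     Ex: RMS.PA → (^FCHI, CAC 40) ; AAPL → (^GSPC, S&P 500).
--     """
--     t = ticker.upper()
--     eu_fr = (".PA",)
--     eu_de = (".DE",)
--     eu_uk = (".L",)
--     eu_ch = (".SW",)
--     eu_nl = (".AS",)
--     eu_it = (".MI",)
--     eu_es = (".MC",)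
--     if any(t.endswith(s) for s in eu_fr):
--         return "^FCHI", "CAC 40"
--     if any(t.endswith(s) for s in eu_de):
--         return "^GDAXI", "DAX 40"
--     if any(t.endswith(s) for s in eu_uk):
--         return "^FTSE", "FTSE 100"
--     if any(t.endswith(s) for s in eu_ch):
--         return "^SSMI", "SMI"
--     if any(t.endswith(s) for s in eu_nl + eu_it + eu_es):
--         return "^STOXX50E", "Euro Stoxx 50"
--     if t.endswith(".T"):
--         return "^N225", "Nikkei 225"
--     if t.endswith(".HK"):
--         return "^HSI", "Hang Seng"
--     return "^GSPC", "S&P 500"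
-- ===== SOURCE B (Python) =====
-- _TABLE = {
--     ".PA": ("^FCHI", "CAC 40"),
--     ".DE": ("^GDAXI", "DAX 40"),
--     ".L": ("^FTSE", "FTSE 100"),
--     ".SW": ("^SSMI", "SMI"),
--     ".AS": ("^STOXX50E", "Euro Stoxx 50"),
--     ".MI": ("^STOXX50E", "Euro Stoxx 50"),
--     ".MC": ("^STOXX50E", "Euro Stoxx 50"),
--     ".T": ("^N225", "Nikkei 225"),
--     ".HK": ("^HSI", "Hang Seng"),
-- }
--
--
-- def _detect_benchmark(ticker: str, sector: str = "") -> tuple[str, str]: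
--     t = ticker.upper()
--     i = t.rfind(".")
--     suffix = "" if i < 0 else t[i:]
--     return _TABLE.get(suffix, ("^GSPC", "S&P 500"))
-- ===== Notes on version B (the rewrite author's own statement) =====
-- stated objective: simpler
-- what changed: Replaces the seven-step endswith branch cascade by extracting the suffix from the last dot (rfind) once and looking it up in a single suffix->(index,name) table with a default.
import Mathlib
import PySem

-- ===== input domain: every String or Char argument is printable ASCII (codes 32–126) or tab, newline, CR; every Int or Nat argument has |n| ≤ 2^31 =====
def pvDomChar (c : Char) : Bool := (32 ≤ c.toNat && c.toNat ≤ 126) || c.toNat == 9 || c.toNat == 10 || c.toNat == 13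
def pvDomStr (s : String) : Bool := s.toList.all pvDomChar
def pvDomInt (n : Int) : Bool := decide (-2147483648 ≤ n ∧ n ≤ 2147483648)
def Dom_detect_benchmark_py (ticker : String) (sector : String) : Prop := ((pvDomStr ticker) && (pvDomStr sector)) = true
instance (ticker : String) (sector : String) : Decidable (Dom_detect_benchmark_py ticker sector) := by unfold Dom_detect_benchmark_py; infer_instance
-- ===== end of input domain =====

-- B replaces A's endswith branch cascade by one rfind-based suffix extraction and a single table lookup (objective: simpler).

-- ===== PORT A =====
-- ===== PORT B (pvTable + detect_benchmark_py_alt below) =====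
def detect_benchmark_py (ticker : String) (sector : String) : String × String :=
  let t := PySem.Str.upper ticker
  let eu_fr : List String := [".PA"]
  let eu_de : List String := [".DE"]
  let eu_uk : List String := [".L"]
  let eu_ch : List String := [".SW"]
  let eu_nl : List String := [".AS"]
  let eu_it : List String := [".MI"]
  let eu_es : List String := [".MC"]
  if eu_fr.any (fun s => PySem.Str.endswith t s) then ("^FCHI", "CAC 40")
  else if eu_de.any (fun s => PySem.Str.endswith t s) then ("^GDAXI", "DAX 40")
  else if eu_uk.any (fun s => PySem.Str.endswith t s) then ("^FTSE", "FTSE 100")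
  else if eu_ch.any (fun s => PySem.Str.endswith t s) then ("^SSMI", "SMI")
  else if (eu_nl ++ eu_it ++ eu_es).any (fun s => PySem.Str.endswith t s) then ("^STOXX50E", "Euro Stoxx 50")
  else if PySem.Str.endswith t ".T" then ("^N225", "Nikkei 225")
  else if PySem.Str.endswith t ".HK" then ("^HSI", "Hang Seng")
  else ("^GSPC", "S&P 500")

def pvTable : PySem.Dict String (String × String) :=
  PySem.Dict.ofList
    [ (".PA", ("^FCHI", "CAC 40"))
    , (".DE", ("^GDAXI", "DAX 40"))
    , (".L", ("^FTSE", "FTSE 100"))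
    , (".SW", ("^SSMI", "SMI"))
    , (".AS", ("^STOXX50E", "Euro Stoxx 50"))
    , (".MI", ("^STOXX50E", "Euro Stoxx 50"))
    , (".MC", ("^STOXX50E", "Euro Stoxx 50"))
    , (".T", ("^N225", "Nikkei 225"))
    , (".HK", ("^HSI", "Hang Seng")) ]

def detect_benchmark_py_alt (ticker : String) (sector : String) : String × String :=
  let t := PySem.Str.upper ticker
  let i := PySem.Str.rfind t "."
  let suffix := if i < 0 then "" else PySem.Str.slice t (some i) none
  pvTable.getD suffix ("^GSPC", "S&P 500")


-- ===== PRECONDITION & SPEC =====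
def Spec_detect_benchmark_py (ticker : String) (sector : String) (out : String × String) : Prop := out = detect_benchmark_py_alt ticker sector
instance (ticker : String) (sector : String) (out : String × String) : Decidable (Spec_detect_benchmark_py ticker sector out) := by unfold Spec_detect_benchmark_py; infer_instance

-- ===== CLAIM (what is proved, stated in full; the proofs are below) =====
def Claim_equal_detect_benchmark_py : Prop := ∀ (ticker : String) (sector : String), Dom_detect_benchmark_py ticker sector → Spec_detect_benchmark_py ticker sector (detect_benchmark_py ticker sector)

-- ===== LEMMAS AND PROOFS =====
theorem pv_rfind_go_eq (s sub : List Char) (k m : Nat) (hmk : m ≤ k)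
    (hm : sub.isPrefixOf (s.drop m) = true)
    (h : ∀ j, m < j → j ≤ k → sub.isPrefixOf (s.drop j) = false) :
    PySem.Chars.rfind.go s sub k = (m : Int) := by
  induction k with
  | zero =>
    have hm0 : m = 0 := Nat.le_zero.mp hmk
    subst hm0
    rw [List.drop_zero] at hm
    simp only [PySem.Chars.rfind.go, hm, if_true, Nat.cast_zero]
  | succ k ih =>
    by_cases hme : m = k + 1
    · subst hme
      simp only [PySem.Chars.rfind.go, hm, if_true]
    · have hfalse : sub.isPrefixOf (s.drop (k + 1)) = false := h (k + 1) (by omega) (by omega)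
      simp only [PySem.Chars.rfind.go, hfalse, Bool.false_eq_true, if_false]
      exact ih (by omega) (fun j h1 h2 => h j h1 (by omega))

theorem pv_rfind_go_neg (s sub : List Char) (k : Nat)
    (h : ∀ j, j ≤ k → sub.isPrefixOf (s.drop j) = false) :
    PySem.Chars.rfind.go s sub k = -1 := by
  induction k with
  | zero =>
    have h0 := h 0 (by omega)
    rw [List.drop_zero] at h0
    simp only [PySem.Chars.rfind.go, h0, Bool.false_eq_true, if_false]
  | succ k ih =>
    simp only [PySem.Chars.rfind.go, h (k + 1) (by omega), Bool.false_eq_true, if_false]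
    exact ih (fun j hj => h j (by omega))

theorem pv_dot_prefix_iff (xs : List Char) : (['.'] : List Char).isPrefixOf xs = true ↔ ∃ ys, xs = '.' :: ys := by
  cases xs with
  | nil => simp [List.isPrefixOf]
  | cons c cs =>
    constructor
    · intro h
      have hc : '.' = c := (List.cons_prefix_cons.mp (List.isPrefixOf_iff_prefix.mp h)).1
      exact ⟨cs, by rw [← hc]⟩
    · rintro ⟨ys, hy⟩
      injection hy with h1 h2
      subst h1
      simp [List.isPrefixOf]

theorem pv_rfind_last_dot (a b : List Char) (hb : '.' ∉ b) :
    PySem.Chars.rfind (a ++ '.' :: b) ['.'] = (a.length : Int) := by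
  unfold PySem.Chars.rfind
  apply pv_rfind_go_eq
  · simp
  · rw [List.drop_left' (by rfl)]
    simp [List.isPrefixOf]
  · intro j h1 h2
    rw [← Bool.not_eq_true]
    intro hp
    obtain ⟨ys, hys⟩ := (pv_dot_prefix_iff _).mp hp
    obtain ⟨n, hn⟩ : ∃ n, j = a.length + 1 + n := ⟨j - a.length - 1, by omega⟩
    have hdrop : (a ++ '.' :: b).drop j = b.drop n := by
      subst hn
      rw [show a ++ '.' :: b = (a ++ ['.']) ++ b by simp]
      rw [show a.length + 1 + n = (a ++ ['.']).length + n by simp]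
      rw [List.drop_append]
      simp
    apply hb
    apply List.mem_of_mem_drop (i := n)
    rw [← hdrop, hys]
    simp

theorem pv_rfind_no_dot (l : List Char) (h : '.' ∉ l) :
    PySem.Chars.rfind l ['.'] = -1 := by
  unfold PySem.Chars.rfind
  apply pv_rfind_go_neg
  intro j _
  rw [← Bool.not_eq_true]
  intro hp
  obtain ⟨ys, hys⟩ := (pv_dot_prefix_iff _).mp hp
  exact h (List.mem_of_mem_drop (i := j) (by rw [hys]; simp))

theorem pv_endswith_iff (a b r : List Char) (hb : '.' ∉ b) (hr : '.' ∉ r) :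
    ('.' :: r) <:+ (a ++ '.' :: b) ↔ r = b := by
  constructor
  · intro hsuf
    have hsb : ('.' :: b) <:+ (a ++ '.' :: b) := ⟨a, rfl⟩
    rcases List.suffix_or_suffix_of_suffix hsuf hsb with h1 | h1
    · obtain ⟨c, hc⟩ := h1
      cases c with
      | nil => simpa using hc
      | cons c0 cs =>
        exfalso
        have hc2 : b = cs ++ '.' :: r := by
          have := hc
          simp only [List.cons_append] at this
          injection this with _ h3
          exact h3.symm
        exact hb (by rw [hc2]; simp)
    · obtain ⟨c, hc⟩ := h1
      cases c with
      | nil => simpa [eq_comm] using hc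
      | cons c0 cs =>
        exfalso
        have hc2 : r = cs ++ '.' :: b := by
          have := hc
          simp only [List.cons_append] at this
          injection this with _ h3
          exact h3.symm
        exact hr (by rw [hc2]; simp)
  · intro h; subst h; exact ⟨a, rfl⟩



theorem pv_split_last_dot (l : List Char) (h : '.' ∈ l) :
    ∃ a b, l = a ++ '.' :: b ∧ '.' ∉ b := by
  induction l with
  | nil => simp at h
  | cons c cs ih =>
    by_cases hc : '.' ∈ cs
    · obtain ⟨a, b, hab, hb⟩ := ih hc
      exact ⟨c :: a, b, by simp [hab], hb⟩
    · have : c = '.' := by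
        rcases List.mem_cons.mp h with h1 | h2
        · exact h1.symm
        · exact absurd h2 hc
      exact ⟨[], cs, by simp [this], hc⟩
-- ===== VERDICT test =====

-- ===== VERDICT (by name: the statement is the Claim_ definition above) =====
theorem detect_benchmark_py_spec : Claim_equal_detect_benchmark_py := by
  intro ticker sector _
  unfold Spec_detect_benchmark_py detect_benchmark_py detect_benchmark_py_alt
  set t := PySem.Str.upper ticker with ht
  set l := t.toList with hl
  by_cases hdot : '.' ∈ l
  · obtain ⟨a, b, hab, hb⟩ := pv_split_last_dot l hdot
    have hrfind : PySem.Str.rfind t "." = (a.length : Int) := by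
      rw [PySem.Str.rfind_eq, show (".").toList = ['.'] from rfl, ← hl, hab]
      exact pv_rfind_last_dot a b hb
    have hsuf : (PySem.Str.slice t (some ((a.length : Nat) : Int)) none).toList = '.' :: b := by
      rw [PySem.Str.toList_slice]
      simp only [PySem.Chars.slice_eq_listSlice]
      rw [PySem.List.slice_from_natCast, ← hl, hab]
      exact List.drop_left' rfl
    have hend : ∀ (key : String) (r : List Char), key.toList = '.' :: r → '.' ∉ r →
        PySem.Str.endswith t key = decide (b = r) := by
      intro key r hkey hrdot
      rw [PySem.Str.endswith_eq, hkey, ← hl, hab]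
      rcases h : decide (b = r) with _ | _
      · simp only [decide_eq_false_iff_not] at h
        rw [← Bool.not_eq_true, PySem.Chars.endswith_iff]
        intro hcon
        exact h ((pv_endswith_iff a b r hb hrdot).mp hcon).symm
      · simp only [decide_eq_true_eq] at h
        subst h
        rw [PySem.Chars.endswith_iff]
        exact (pv_endswith_iff a b b hb hrdot).mpr rfl
    have hkeyeq : ∀ (key : String) (r : List Char), key.toList = '.' :: r →
        (key == (PySem.Str.slice t (some ((a.length : Nat) : Int)) none)) = decide (b = r) := by
      intro key r hkey
      rcases h : decide (b = r) with _ | _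
      · simp only [decide_eq_false_iff_not] at h
        rw [beq_eq_false_iff_ne]
        intro hcon
        apply h
        have h2 : key.toList = '.' :: b := by rw [hcon, hsuf]
        rw [hkey] at h2
        injection h2 with _ h3
        exact h3.symm
      · simp only [decide_eq_true_eq] at h
        subst h
        have : key = PySem.Str.slice t (some ((a.length : Nat) : Int)) none :=
          String.toList_inj.mp (by rw [hkey, hsuf])
        rw [this, beq_self_eq_true]
    have htab : pvTable = PySem.Dict.mk
      [ (".PA", ("^FCHI", "CAC 40")), (".DE", ("^GDAXI", "DAX 40")), (".L", ("^FTSE", "FTSE 100")),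
        (".SW", ("^SSMI", "SMI")), (".AS", ("^STOXX50E", "Euro Stoxx 50")), (".MI", ("^STOXX50E", "Euro Stoxx 50")),
        (".MC", ("^STOXX50E", "Euro Stoxx 50")), (".T", ("^N225", "Nikkei 225")), (".HK", ("^HSI", "Hang Seng")) ] := rfl
    simp only [List.any_cons, List.any_nil, Bool.or_false, List.cons_append, List.nil_append]
    rw [hend ".PA" ['P','A'] rfl (by decide),
        hend ".DE" ['D','E'] rfl (by decide),
        hend ".L" ['L'] rfl (by decide),
        hend ".SW" ['S','W'] rfl (by decide),
        hend ".AS" ['A','S'] rfl (by decide),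
        hend ".MI" ['M','I'] rfl (by decide),
        hend ".MC" ['M','C'] rfl (by decide),
        hend ".T" ['T'] rfl (by decide),
        hend ".HK" ['H','K'] rfl (by decide)]
    rw [hrfind, if_neg (by omega : ¬ ((a.length : Int) < 0)), htab]
    unfold PySem.Dict.getD
    rw [PySem.Dict.get?_mk_cons, PySem.Dict.get?_mk_cons, PySem.Dict.get?_mk_cons,
        PySem.Dict.get?_mk_cons, PySem.Dict.get?_mk_cons, PySem.Dict.get?_mk_cons,
        PySem.Dict.get?_mk_cons, PySem.Dict.get?_mk_cons, PySem.Dict.get?_mk_cons]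
    rw [hkeyeq ".PA" ['P','A'] rfl,
        hkeyeq ".DE" ['D','E'] rfl,
        hkeyeq ".L" ['L'] rfl,
        hkeyeq ".SW" ['S','W'] rfl,
        hkeyeq ".AS" ['A','S'] rfl,
        hkeyeq ".MI" ['M','I'] rfl,
        hkeyeq ".MC" ['M','C'] rfl,
        hkeyeq ".T" ['T'] rfl,
        hkeyeq ".HK" ['H','K'] rfl]
    by_cases h1 : b = ['P','A']
    · subst h1; simp
    by_cases h2 : b = ['D','E']
    · subst h2; simp
    by_cases h3 : b = ['L']
    · subst h3; simp
    by_cases h4 : b = ['S','W']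
    · subst h4; simp
    by_cases h5 : b = ['A','S']
    · subst h5; simp
    by_cases h6 : b = ['M','I']
    · subst h6; simp
    by_cases h7 : b = ['M','C']
    · subst h7; simp
    by_cases h8 : b = ['T']
    · subst h8; simp
    by_cases h9 : b = ['H','K']
    · subst h9; simp
    simp only [decide_eq_false h1, decide_eq_false h2, decide_eq_false h3, decide_eq_false h4,
      decide_eq_false h5, decide_eq_false h6, decide_eq_false h7, decide_eq_false h8,
      decide_eq_false h9, Bool.false_eq_true, if_false, Bool.or_self]
    rfl
  · have hends : ∀ (key : String) (r : List Char), key.toList = '.' :: r →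
        PySem.Str.endswith t key = false := by
      intro key r hkey
      rw [PySem.Str.endswith_eq, hkey, ← Bool.not_eq_true, PySem.Chars.endswith_iff]
      intro hcon
      exact hdot (hcon.subset (by simp))
    have hrfind : PySem.Str.rfind t "." = -1 := by
      rw [PySem.Str.rfind_eq, show (".").toList = ['.'] from rfl, ← hl]
      exact pv_rfind_no_dot l hdot
    simp only [List.any_cons, List.any_nil, Bool.or_false, List.cons_append, List.nil_append]
    rw [hends ".PA" ['P','A'] rfl,
        hends ".DE" ['D','E'] rfl,
        hends ".L" ['L'] rfl,
        hends ".SW" ['S','W'] rfl,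
        hends ".AS" ['A','S'] rfl,
        hends ".MI" ['M','I'] rfl,
        hends ".MC" ['M','C'] rfl,
        hends ".T" ['T'] rfl,
        hends ".HK" ['H','K'] rfl]
    rw [hrfind]
    simp
    decide
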